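-- pv_equiv track=rewrite | github.com/Bandi120424/Algorithm_Python | 백준/Silver/1244. 스위치 켜고 끄기/스위치 켜고 끄기.py | op_2
-- ===== SOURCE A (Python) =====
-- def op_2(status, total_switch, num):  # 대칭인 스위치 상태를 바꿈
--     pre = num - 1
--     post = num + 1
--     status[num] = not status[num]
--     while (pre > 0) and (post <= total_switch):
--
--         if status[pre] != status[post]:
--             break
--
--         status[pre] = not status[pre]
--         status[post] = not status[post]
--         pre -= 1
--         post += 1
--
--     return status
-- ===== SOURCE B (Python) =====
-- def op_2(status, total_switch, num):
--     # Two-phase: first measure the matching radius r around num, then flip the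
--     # whole symmetric block status[num-r..num+r] in one loop (in-place, like A).
--     r = 0
--     while num - r - 1 > 0 and num + r + 1 <= total_switch and status[num - r - 1] == status[num + r + 1]:
--         r += 1
--     for i in range(-r, r + 1):
--         status[num + i] = not status[num + i]
--     return status
-- ===== Notes on version B (the rewrite author's own statement) =====
-- stated objective: simpler
-- what changed: A's single interleaved loop that checks each symmetric pair and toggles it in the same step is replaced by two phases: first a pure scan that computes the matching radius r on the untouched list, then one uniform flip of the whole block status[num-r..num+r] via range(-r, r+1).
import Mathlib
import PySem

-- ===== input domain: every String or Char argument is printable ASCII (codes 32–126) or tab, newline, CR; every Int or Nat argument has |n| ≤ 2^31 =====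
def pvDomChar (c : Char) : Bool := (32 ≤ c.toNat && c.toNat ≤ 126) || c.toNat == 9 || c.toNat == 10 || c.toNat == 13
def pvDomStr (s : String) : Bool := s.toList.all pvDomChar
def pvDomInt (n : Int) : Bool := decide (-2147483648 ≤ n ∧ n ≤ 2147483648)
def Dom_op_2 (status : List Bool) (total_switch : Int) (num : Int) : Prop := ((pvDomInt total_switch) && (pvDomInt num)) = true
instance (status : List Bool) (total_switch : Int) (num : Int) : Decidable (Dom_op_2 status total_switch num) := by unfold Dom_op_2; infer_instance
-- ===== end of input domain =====

-- B replaces A's interleaved check-and-toggle loop by two phases (measure the matching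
-- radius, then flip the whole symmetric block); equivalence is about the RETURN value —
-- both Pythons also mutate `status` in place, and both leave it equal to the returned list.

-- 'status[i] = not status[i]' (both Pythons): read xs[i], write back its negation.
def pvTog (s : List Bool) (i : Int) : List Bool :=
  PySem.List.pySetD s i (!(PySem.List.pyGetD s i false))

-- ===== PORT A =====
-- A's while loop: state (status, pre, post); break on mismatch, else toggle the pair.
def op2Loop (status : List Bool) (total_switch : Int) (pre post : Int) : List Bool :=
  if h : 0 < pre ∧ post ≤ total_switch then
    if PySem.List.pyGetD status pre false ≠ PySem.List.pyGetD status post false then status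
    else op2Loop (pvTog (pvTog status pre) post) total_switch (pre - 1) (post + 1)
  else status
termination_by pre.toNat
decreasing_by omega

def op_2 (status : List Bool) (total_switch : Int) (num : Int) : List Bool :=
  op2Loop (pvTog status num) total_switch (num - 1) (num + 1)

-- ===== PORT B =====
-- B's first phase: the matching radius r (A-style bounds, comparisons on the untouched list).
def op2Rad (status : List Bool) (total_switch : Int) (num : Int) (r : Int) : Int :=
  if h : 0 < num - r - 1 ∧ num + r + 1 ≤ total_switch ∧
      PySem.List.pyGetD status (num - r - 1) false = PySem.List.pyGetD status (num + r + 1) false then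
    op2Rad status total_switch num (r + 1)
  else r
termination_by (num - r).toNat
decreasing_by omega

-- B's second phase: 'for i in range(-r, r+1): status[num+i] = not status[num+i]'.
def op_2_alt (status : List Bool) (total_switch : Int) (num : Int) : List Bool :=
  let r := op2Rad status total_switch num 0
  (PySem.List.pyRange (-r) (r + 1)).foldl (fun s i => pvTog s (num + i)) status

-- ===== PRECONDITION & SPEC =====
-- Pre_ excludes exactly the inputs on which the Python A raises IndexError: num itself out
-- of range for status, or the symmetric scan reaching an index ≥ len(status) while still
-- allowed by total_switch and all nearer pairs matching (B's Python raises there too).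
def Pre_op_2 (status : List Bool) (total_switch : Int) (num : Int) : Prop :=
  PySem.Raise.InRange status.length num ∧
  ∀ i : Nat, i < status.length →
    0 < num - ((i : Int) + 1) → num + ((i : Int) + 1) ≤ total_switch →
    (∀ j : Nat, j < i →
      PySem.List.pyGetD status (num - ((j : Int) + 1)) false
        = PySem.List.pyGetD status (num + ((j : Int) + 1)) false) →
    num + ((i : Int) + 1) < (status.length : Int)
instance (status : List Bool) (total_switch : Int) (num : Int) : Decidable (Pre_op_2 status total_switch num) := by unfold Pre_op_2; infer_instance

def pvWitness_op_2 : List Bool × Int × Int := ([true, false, true, false, true], 4, 2)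

def Spec_op_2 (status : List Bool) (total_switch : Int) (num : Int) (out : List Bool) : Prop := out = op_2_alt status total_switch num
instance (status : List Bool) (total_switch : Int) (num : Int) (out : List Bool) : Decidable (Spec_op_2 status total_switch num out) := by unfold Spec_op_2; infer_instance

-- ===== CLAIM (what is proved, stated in full; the proofs are below) =====
def Claim_equal_op_2 : Prop := ∀ (status : List Bool) (total_switch : Int) (num : Int), Dom_op_2 status total_switch num → Pre_op_2 status total_switch num → Spec_op_2 status total_switch num (op_2 status total_switch num)

-- ===== LEMMAS AND PROOFS =====

theorem pvGetD_nonneg (xs : List Bool) (i : Int) (d : Bool) (h : 0 ≤ i) :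
    PySem.List.pyGetD xs i d = xs.getD i.toNat d := by
  simp only [PySem.List.pyGetD, PySem.List.pyGet?, PySem.List.pyIdx?, if_pos h, List.getD]
  split_ifs with h2
  · rfl
  · simp [List.getElem?_eq_none (by omega : xs.length ≤ i.toNat)]

theorem getD_pvTog_ne (s : List Bool) (i j : Int) (hi : 0 ≤ i) (hj : 0 ≤ j) (hne : i ≠ j) :
    PySem.List.pyGetD (pvTog s j) i false = PySem.List.pyGetD s i false := by
  simp only [pvTog, PySem.List.pySetD_of_nonneg _ _ hj, pvGetD_nonneg _ _ _ hi, List.getD,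
    List.getElem?_set_ne (by omega : j.toNat ≠ i.toNat)]

theorem getD_foldl_pvTog (idxs : List Int) :
    ∀ (s : List Bool) (i : Int), 0 ≤ i → (∀ j ∈ idxs, 0 ≤ j ∧ j ≠ i) →
    PySem.List.pyGetD (idxs.foldl pvTog s) i false = PySem.List.pyGetD s i false := by
  induction idxs with
  | nil => intro s i _ _; rfl
  | cons a l ih =>
    intro s i hi hall
    have ha := hall a (List.mem_cons_self)
    rw [List.foldl_cons, ih (pvTog s a) i hi (fun j hj => hall j (List.mem_cons_of_mem _ hj)),
      getD_pvTog_ne s i a hi ha.1 (Ne.symm ha.2)]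

theorem pvTog_comm (s : List Bool) (i j : Int) (hi : 0 ≤ i) (hj : 0 ≤ j) :
    pvTog (pvTog s i) j = pvTog (pvTog s j) i := by
  by_cases hne : i = j
  · rw [hne]
  · have h1 := getD_pvTog_ne s i j hi hj hne
    have h2 := getD_pvTog_ne s j i hj hi (Ne.symm hne)
    simp only [pvTog] at h1 h2 ⊢
    rw [h1, h2]
    simp only [PySem.List.pySetD_of_nonneg _ _ hi, PySem.List.pySetD_of_nonneg _ _ hj]
    exact List.set_comm _ _ (by omega)

-- the pair-toggle positions of A's first r iterations, in A's order
def pvPairs (num : Int) (r : Int) : List Int :=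
  (List.range r.toNat).flatMap (fun (j : Nat) => [num - ((j : Int) + 1), num + ((j : Int) + 1)])

theorem pvPairs_succ (num r : Int) (hr : 0 ≤ r) :
    pvPairs num (r + 1) = pvPairs num r ++ [num - (r + 1), num + (r + 1)] := by
  have h : (r + 1).toNat = r.toNat + 1 := by omega
  simp [pvPairs, h, List.range_succ]
  exact hr

theorem mem_pvPairs (num r x : Int) (hx : x ∈ pvPairs num r) :
    ∃ j : Int, 1 ≤ j ∧ j ≤ r ∧ (x = num - j ∨ x = num + j) := by
  simp only [pvPairs, List.mem_flatMap, List.mem_range, List.mem_cons, List.not_mem_nil,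
    or_false] at hx
  obtain ⟨j, hj, hx⟩ := hx
  refine ⟨(j : Int) + 1, by omega, by omega, ?_⟩
  rcases hx with h | h
  · left; omega
  · right; omega

-- A's loop, started after r matching iterations, ends in the state "pairs up to the radius toggled".
theorem pvLoop_eq (s : List Bool) (ts num : Int) :
    ∀ (n : Nat) (r : Int), (num - r).toNat ≤ n → 0 ≤ r → 1 ≤ num - r →
    op2Loop ((num :: pvPairs num r).foldl pvTog s) ts (num - r - 1) (num + r + 1)
      = (num :: pvPairs num (op2Rad s ts num r)).foldl pvTog s := by
  intro n
  induction n with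
  | zero => intro r hn _ hnum; omega
  | succ n ih =>
    intro r hn hr hnum
    have hmem : ∀ j ∈ num :: pvPairs num r, 0 ≤ j ∧ num - r ≤ j ∧ j ≤ num + r := by
      intro j hj
      rcases List.mem_cons.mp hj with h | h
      · omega
      · obtain ⟨t, ht1, ht2, ht3⟩ := mem_pvPairs num r j h; omega
    rw [op2Rad]
    by_cases hc : 0 < num - r - 1 ∧ num + r + 1 ≤ ts ∧
        PySem.List.pyGetD s (num - r - 1) false = PySem.List.pyGetD s (num + r + 1) false
    · -- matching pair: both sides take one more step
      have hpre := getD_foldl_pvTog (num :: pvPairs num r) s (num - r - 1) (by omega)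
        (fun j hj => ⟨(hmem j hj).1, by have := hmem j hj; omega⟩)
      have hpost := getD_foldl_pvTog (num :: pvPairs num r) s (num + r + 1) (by omega)
        (fun j hj => ⟨(hmem j hj).1, by have := hmem j hj; omega⟩)
      rw [dif_pos hc, op2Loop, dif_pos ⟨hc.1, hc.2.1⟩, if_neg (by rw [hpre, hpost]; simp [hc.2.2])]
      have hstate : pvTog (pvTog ((num :: pvPairs num r).foldl pvTog s) (num - r - 1)) (num + r + 1)
          = (num :: pvPairs num (r + 1)).foldl pvTog s := by
        rw [pvPairs_succ num r hr]
        have : num :: (pvPairs num r ++ [num - (r + 1), num + (r + 1)])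
            = (num :: pvPairs num r) ++ [num - (r + 1), num + (r + 1)] := by simp
        rw [this, List.foldl_append]
        have e1 : num - (r + 1) = num - r - 1 := by ring
        have e2 : num + (r + 1) = num + r + 1 := by ring
        rw [e1, e2]; rfl
      rw [hstate]
      have e1 : num - r - 1 - 1 = num - (r + 1) - 1 := by ring
      have e2 : num + r + 1 + 1 = num + (r + 1) + 1 := by ring
      rw [e1, e2]
      exact ih (r + 1) (by omega) (by omega) (by omega)
    · -- loop and radius scan both stop here, with the same state
      rw [dif_neg hc, op2Loop]
      by_cases hb : 0 < num - r - 1 ∧ num + r + 1 ≤ ts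
      · have hpre := getD_foldl_pvTog (num :: pvPairs num r) s (num - r - 1) (by omega)
          (fun j hj => ⟨(hmem j hj).1, by have := hmem j hj; omega⟩)
        have hpost := getD_foldl_pvTog (num :: pvPairs num r) s (num + r + 1) (by omega)
          (fun j hj => ⟨(hmem j hj).1, by have := hmem j hj; omega⟩)
        have hne : PySem.List.pyGetD s (num - r - 1) false ≠ PySem.List.pyGetD s (num + r + 1) false := by
          intro h; exact hc ⟨hb.1, hb.2, h⟩
        rw [dif_pos hb, if_pos (by rw [hpre, hpost]; exact hne)]
      · rw [dif_neg hb]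

theorem op2Rad_ge (s : List Bool) (ts num : Int) :
    ∀ (n : Nat) (r : Int), (num - r).toNat ≤ n → r ≤ op2Rad s ts num r := by
  intro n
  induction n with
  | zero =>
    intro r hn
    rw [op2Rad]
    split_ifs with h
    · obtain ⟨h1, -, -⟩ := h; omega
    · omega
  | succ n ih =>
    intro r hn
    rw [op2Rad]
    split_ifs with h
    · obtain ⟨h1, -, -⟩ := h
      have := ih (r + 1) (by omega); omega
    · omega

theorem op2Rad_lt (s : List Bool) (ts num : Int) :
    ∀ (n : Nat) (r : Int), (num - r).toNat ≤ n → 1 ≤ num - r → 1 ≤ num - op2Rad s ts num r := by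
  intro n
  induction n with
  | zero => intro r hn hr; omega
  | succ n ih =>
    intro r hn hr
    rw [op2Rad]
    split_ifs with h
    · obtain ⟨h1, -, -⟩ := h
      exact ih (r + 1) (by omega) (by omega)
    · omega

-- A's toggle order (center first, then pairs outward) is a permutation of B's block order.
theorem pvPerm (num : Int) :
    ∀ (r : Int), 0 ≤ r →
    (num :: pvPairs num r).Perm ((PySem.List.pyRange (-r) (r + 1)).map (fun i => num + i)) := by
  intro r hr
  induction r, hr using Int.le_induction with
  | base =>
    have h0 : PySem.List.pyRange (0:Int) 1 = [0] := by decide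
    simp [pvPairs, h0]
  | succ r hr ih =>
    have hcons : PySem.List.pyRange (-(r + 1)) (r + 1 + 1)
        = (-(r + 1)) :: PySem.List.pyRange (-r) (r + 1 + 1) := by
      rw [PySem.List.pyRange_one_cons (by omega)]
      have : -(r + 1) + 1 = -r := by ring
      rw [this]
    have happ : PySem.List.pyRange (-r) (r + 1 + 1)
        = PySem.List.pyRange (-r) (r + 1) ++ [r + 1] :=
      PySem.List.pyRange_one_succ_right (by omega)
    rw [hcons, happ, pvPairs_succ num r hr]
    simp only [List.map_cons, List.map_append, List.map_nil]
    have e1 : num + -(r + 1) = num - (r + 1) := by ring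
    rw [e1]
    have p1 : num :: (pvPairs num r ++ [num - (r + 1), num + (r + 1)])
        = ((num :: pvPairs num r) ++ [num - (r + 1)]) ++ [num + (r + 1)] := by simp
    rw [p1]
    refine ((List.perm_append_singleton _ _).append_right _).trans ?_
    rw [List.cons_append]
    exact List.Perm.cons _ (ih.append_right _)

-- ===== VERDICT (by name: the statement is the Claim_ definition above) =====
theorem op_2_spec : Claim_equal_op_2 := by
  intro s ts num _ _
  show op_2 s ts num = op_2_alt s ts num
  by_cases hnum : 1 ≤ num
  · -- the loop really may run: A = center-then-pairs fold, B = block fold, a permutation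
    have hstart : op_2 s ts num
        = (num :: pvPairs num (op2Rad s ts num 0)).foldl pvTog s := by
      have e1 : num - 1 = num - 0 - 1 := by ring
      have e2 : num + 1 = num + 0 + 1 := by ring
      have h0 : pvTog s num = (num :: pvPairs num 0).foldl pvTog s := rfl
      rw [op_2, e1, e2, h0]
      exact pvLoop_eq s ts num (num - 0).toNat 0 le_rfl le_rfl (by omega)
    set R := op2Rad s ts num 0 with hR
    have hRge : 0 ≤ R := op2Rad_ge s ts num num.toNat 0 (by omega)
    have hRlt : 1 ≤ num - R := op2Rad_lt s ts num num.toNat 0 (by omega) (by omega)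
    have hmem : ∀ x ∈ num :: pvPairs num R, 0 ≤ x := by
      intro x hx
      rcases List.mem_cons.mp hx with h | h
      · omega
      · obtain ⟨t, ht1, ht2, ht3⟩ := mem_pvPairs num R x h; omega
    have hcomm : ∀ x ∈ num :: pvPairs num R, ∀ y ∈ num :: pvPairs num R,
        ∀ z : List Bool, pvTog (pvTog z x) y = pvTog (pvTog z y) x := by
      intro x hx y hy z
      exact pvTog_comm z x y (hmem x hx) (hmem y hy)
    rw [hstart, List.Perm.foldl_eq' (pvPerm num R hRge) hcomm s, List.foldl_map, op_2_alt, ← hR]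
  · -- num ≤ 0: A's loop and B's scan both do nothing; only status[num] is toggled
    have hA : op_2 s ts num = pvTog s num := by
      rw [op_2, op2Loop, dif_neg (by omega)]
    have hr : op2Rad s ts num 0 = 0 := by
      rw [op2Rad, dif_neg (by rintro ⟨h1, -, -⟩; omega)]
    have h0 : PySem.List.pyRange (-(0:Int)) (0 + 1) = [0] := by decide
    rw [hA, op_2_alt]
    simp only [hr, h0, List.foldl_cons, List.foldl_nil, add_zero]
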